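-- pv_equiv track=rewrite | github.com/NOMADe-Joshua/nomad-perotf-jupyter-voila-scripts | JV-Analysis_v6/plot_manager_JV.py | _get_intelligent_colors
-- ===== SOURCE A (Python) =====
-- def _get_intelligent_colors(categories, num_needed, color_scheme=None):
--     """Distribute colors intelligently"""
--     if color_scheme is None:
--         color_scheme = ['rgba(93, 164, 214, 0.7)', 'rgba(255, 144, 14, 0.7)']
--     if num_needed <= len(color_scheme):
--         return color_scheme[:num_needed]
--     colors = []
--     for i in range(num_needed):
--         colors.append(color_scheme[i % len(color_scheme)])
--     return colors
-- ===== SOURCE B (Python) =====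
-- def _get_intelligent_colors(categories, num_needed, color_scheme=None):
--     """Distribute colors intelligently"""
--     if color_scheme is None:
--         color_scheme = ['rgba(93, 164, 214, 0.7)', 'rgba(255, 144, 14, 0.7)']
--     colors = []
--     k = num_needed
--     while k > len(color_scheme):
--         colors += color_scheme
--         k -= len(color_scheme)
--     return colors + color_scheme[:k]
-- ===== Notes on version B (the rewrite author's own statement) =====
-- stated objective: alternative
-- what changed: B drops the small-case guard and the per-element modulo-index loop: a while loop appends whole copies of the scheme while more than one copy is still needed, then concatenates the final partial slice color_scheme[:k].
import Mathlib
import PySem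

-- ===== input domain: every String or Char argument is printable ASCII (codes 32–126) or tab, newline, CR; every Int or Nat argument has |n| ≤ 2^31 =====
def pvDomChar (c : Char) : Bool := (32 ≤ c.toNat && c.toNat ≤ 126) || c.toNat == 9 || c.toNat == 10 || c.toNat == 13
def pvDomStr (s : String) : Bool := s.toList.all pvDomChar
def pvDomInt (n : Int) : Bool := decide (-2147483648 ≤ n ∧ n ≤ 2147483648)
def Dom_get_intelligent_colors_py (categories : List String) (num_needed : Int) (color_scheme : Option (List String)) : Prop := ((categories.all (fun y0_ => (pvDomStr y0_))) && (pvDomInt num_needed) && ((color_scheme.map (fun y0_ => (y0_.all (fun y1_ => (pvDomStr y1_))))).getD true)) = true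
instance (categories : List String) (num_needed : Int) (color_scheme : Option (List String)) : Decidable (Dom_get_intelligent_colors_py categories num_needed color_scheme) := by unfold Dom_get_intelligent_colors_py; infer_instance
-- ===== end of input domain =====

-- B replaces A's small-case guard plus per-element modulo-index loop by a guardless while
-- loop that appends whole copies of the scheme and finishes with one partial slice;
-- objective: alternative.

-- ===== PORT A =====
def get_intelligent_colors_py (categories : List String) (num_needed : Int) (color_scheme : Option (List String)) : List String :=
  let scheme := color_scheme.getD ["rgba(93, 164, 214, 0.7)", "rgba(255, 144, 14, 0.7)"]
  if num_needed ≤ (scheme.length : Int) then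
    PySem.List.slice scheme none (some num_needed)
  else
    (PySem.List.pyRange 0 num_needed 1).foldl
      (fun colors i =>
        colors ++ [PySem.List.pyGetD scheme (PySem.Int.mod i (scheme.length : Int)) ""]) []

-- ===== PORT B =====
-- B's while loop 'while k > len(scheme): colors += scheme; k -= len(scheme)' as fuel
-- recursion over the same state (colors, k); fuel = num_needed.toNat suffices whenever the
-- scheme is nonempty (k drops by ≥ 1 per iteration); scheme = [] with num_needed > 0 is
-- Python's infinite loop / ZeroDivisionError case, excluded by Pre_.
def pvCycleLoop (scheme : List String) : Nat → List String → Int → List String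
  | 0, colors, k => colors ++ PySem.List.slice scheme none (some k)
  | fuel + 1, colors, k =>
    if (scheme.length : Int) < k then
      pvCycleLoop scheme fuel (colors ++ scheme) (k - scheme.length)
    else
      colors ++ PySem.List.slice scheme none (some k)

def get_intelligent_colors_py_alt (categories : List String) (num_needed : Int) (color_scheme : Option (List String)) : List String :=
  let scheme := color_scheme.getD ["rgba(93, 164, 214, 0.7)", "rgba(255, 144, 14, 0.7)"]
  pvCycleLoop scheme num_needed.toNat [] num_needed

-- ===== PRECONDITION & SPEC =====
-- A raises ZeroDivisionError (i % 0) when the given scheme is the empty list and num_needed > 0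
-- (B loops forever there); exactly those inputs are excluded.
def Pre_get_intelligent_colors_py (categories : List String) (num_needed : Int) (color_scheme : Option (List String)) : Prop :=
  color_scheme ≠ some [] ∨ num_needed ≤ 0
instance (categories : List String) (num_needed : Int) (color_scheme : Option (List String)) : Decidable (Pre_get_intelligent_colors_py categories num_needed color_scheme) := by unfold Pre_get_intelligent_colors_py; infer_instance

def pvWitness_get_intelligent_colors_py : List String × Int × Option (List String) := (["a", "b"], 5, some ["x", "y"])

def Spec_get_intelligent_colors_py (categories : List String) (num_needed : Int) (color_scheme : Option (List String)) (out : List String) : Prop := out = get_intelligent_colors_py_alt categories num_needed color_scheme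
instance (categories : List String) (num_needed : Int) (color_scheme : Option (List String)) (out : List String) : Decidable (Spec_get_intelligent_colors_py categories num_needed color_scheme out) := by unfold Spec_get_intelligent_colors_py; infer_instance

-- ===== CLAIM (what is proved, stated in full; the proofs are below) =====
def Claim_equal_get_intelligent_colors_py : Prop := ∀ (categories : List String) (num_needed : Int) (color_scheme : Option (List String)), Dom_get_intelligent_colors_py categories num_needed color_scheme → Pre_get_intelligent_colors_py categories num_needed color_scheme → Spec_get_intelligent_colors_py categories num_needed color_scheme (get_intelligent_colors_py categories num_needed color_scheme)

-- ===== LEMMAS AND PROOFS =====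

-- Replication bound: (n // L + 1) copies of an L-element list cover index n.
theorem rep_bound (n L : Nat) (hL : 0 < L) :
    (PySem.Int.floordiv (n : Int) (L : Int) + 1).toNat * L > n := by
  rw [PySem.Int.floordiv_natCast]
  have h1 : (((n / L : Nat) : Int) + 1).toNat = n / L + 1 := by
    generalize (n / L : Nat) = q; omega
  rw [h1]
  have h3 : n % L < L := Nat.mod_lt _ hL
  calc n = L * (n / L) + n % L := (Nat.div_add_mod n L).symm
    _ < L * (n / L) + L := Nat.add_lt_add_left h3 _
    _ ≤ (n / L + 1) * L := by ring_nf; omega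

-- An element of a replicated-and-flattened list is the modulo-indexed element of the base list.
theorem getElem?_flatten_replicate {α : Type} (xs : List α) (r k : Nat)
    (hxs : 0 < xs.length) (hk : k < r * xs.length) :
    (List.replicate r xs).flatten[k]? = xs[k % xs.length]? := by
  induction r generalizing k with
  | zero => omega
  | succ r ih =>
    rw [List.replicate_succ, List.flatten_cons]
    by_cases h : k < xs.length
    · rw [List.getElem?_append_left h, Nat.mod_eq_of_lt h]
    · push_neg at h
      rw [Nat.succ_mul] at hk
      rw [List.getElem?_append_right h, ih (k - xs.length) (by omega)]
      conv_rhs => rw [Nat.mod_eq_sub_mod h]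

-- Two replicate-and-truncate results agree as long as both replications cover the cut.
theorem take_flatten_replicate_congr {α : Type} (xs : List α) (hL : 0 < xs.length)
    (k r₁ r₂ : Nat) (h1 : k ≤ r₁ * xs.length) (h2 : k ≤ r₂ * xs.length) :
    ((List.replicate r₁ xs).flatten).take k = ((List.replicate r₂ xs).flatten).take k := by
  apply List.ext_getElem?
  intro i
  by_cases hi : i < k
  · rw [List.getElem?_take_of_lt hi, List.getElem?_take_of_lt hi,
      getElem?_flatten_replicate xs r₁ i hL (by omega),
      getElem?_flatten_replicate xs r₂ i hL (by omega)]
  · rw [List.getElem?_eq_none (by simp [List.length_take]; omega),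
      List.getElem?_eq_none (by simp [List.length_take]; omega)]

-- The loop of A: appending f i for i in a list is a map.
theorem foldl_append_map {α β : Type} (l : List α) (f : α → β) (acc : List β) :
    l.foldl (fun colors i => colors ++ [f i]) acc = acc ++ l.map f := by
  induction l generalizing acc with
  | nil => simp
  | cons x t ih => simp [List.foldl_cons, ih, List.append_assoc]

-- A's modulo loop equals replicate-and-truncate.
theorem a_loop_eq (num_needed : Int) (scheme : List String)
    (hL : 0 < scheme.length) (hn : (scheme.length : Int) < num_needed) :
    (PySem.List.pyRange 0 num_needed 1).foldl
      (fun colors i =>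
        colors ++ [PySem.List.pyGetD scheme (PySem.Int.mod i (scheme.length : Int)) ""]) []
    = ((List.replicate (PySem.Int.floordiv num_needed (scheme.length : Int) + 1).toNat scheme).flatten).take num_needed.toNat := by
  have hn0 : 0 ≤ num_needed := by omega
  obtain ⟨n, rfl⟩ : ∃ n : Nat, num_needed = (n : Int) :=
    ⟨num_needed.toNat, (Int.toNat_of_nonneg hn0).symm⟩
  rw [foldl_append_map, List.nil_append, PySem.List.pyRange_one]
  simp only [Int.sub_zero, Int.toNat_natCast, zero_add, List.map_map]
  have hbound := rep_bound n scheme.length hL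
  set r := (PySem.Int.floordiv (n : Int) (scheme.length : Int) + 1).toNat with hr
  apply List.ext_getElem?
  intro k
  by_cases hk : k < n
  · have hkr : k < r * scheme.length := by omega
    rw [List.getElem?_take_of_lt hk, getElem?_flatten_replicate scheme r k hL hkr]
    have hkn : k < (List.range n).length := by simpa using hk
    rw [List.getElem?_map, List.getElem?_eq_getElem hkn]
    have hmod : PySem.Int.mod (((List.range n)[k] : Nat) : Int) (scheme.length : Int)
        = (((List.range n)[k] % scheme.length : Nat) : Int) := by
      rw [PySem.Int.mod_natCast]
    simp only [Function.comp, Option.map_some, hmod, PySem.List.pyGetD_natCast]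
    rw [List.getElem_range, List.getD_eq_getElem _ _ (Nat.mod_lt _ hL),
        List.getElem?_eq_getElem (Nat.mod_lt _ hL)]
  · push_neg at hk
    rw [List.getElem?_eq_none (by simpa using hk),
        List.getElem?_eq_none (by simp [List.length_take]; omega)]

-- If the loop condition is false, the loop exits immediately, for any fuel.
theorem pvCycleLoop_exit (scheme : List String) (fuel : Nat) (colors : List String) (k : Int)
    (h : ¬ (scheme.length : Int) < k) :
    pvCycleLoop scheme fuel colors k = colors ++ PySem.List.slice scheme none (some k) := by
  cases fuel with
  | zero => rfl
  | succ fuel => simp [pvCycleLoop, h]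

-- B's loop invariant: with positive k and enough fuel, the loop produces the
-- replicate-and-truncate value appended to the accumulator.
theorem pvCycleLoop_eq (scheme : List String) (hL : 0 < scheme.length) :
    ∀ (fuel : Nat) (colors : List String) (k : Int), 0 < k →
      k ≤ (fuel : Int) * scheme.length + scheme.length →
      pvCycleLoop scheme fuel colors k
        = colors ++ ((List.replicate (fuel + 1) scheme).flatten).take k.toNat := by
  intro fuel
  induction fuel with
  | zero =>
    intro colors k hk hub
    simp only [Nat.cast_zero, zero_mul, zero_add] at hub
    rw [pvCycleLoop_exit scheme 0 colors k (by omega),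
        PySem.List.slice_to scheme (by omega : (0:Int) ≤ k)]
    simp
  | succ fuel ih =>
    intro colors k hk hub
    by_cases hgt : (scheme.length : Int) < k
    · rw [show pvCycleLoop scheme (fuel + 1) colors k
          = pvCycleLoop scheme fuel (colors ++ scheme) (k - scheme.length) by
            simp [pvCycleLoop, hgt]]
      have hdist : ((fuel : Int) + 1) * scheme.length = (fuel : Int) * scheme.length + scheme.length := by ring
      rw [ih (colors ++ scheme) (k - scheme.length) (by omega)
        (by push_cast at hub ⊢; rw [hdist] at hub; omega)]
      rw [List.append_assoc]
      congr 1
      conv_rhs => rw [show fuel + 1 + 1 = (fuel + 1) + 1 by rfl, List.replicate_succ,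
        List.flatten_cons, List.take_append]
      rw [List.take_of_length_le (by omega : scheme.length ≤ k.toNat),
        show (k - (scheme.length : Int)).toNat = k.toNat - scheme.length by omega]
    · rw [pvCycleLoop_exit scheme (fuel + 1) colors k hgt]
      congr 1
      rw [PySem.List.slice_to scheme (by omega : (0:Int) ≤ k),
        List.replicate_succ, List.flatten_cons, List.take_append,
        show k.toNat - scheme.length = 0 by omega, List.take_zero, List.append_nil]

-- ===== VERDICT (by name: the statement is the Claim_ definition above) =====
theorem get_intelligent_colors_py_spec : Claim_equal_get_intelligent_colors_py := by
  intro categories num_needed color_scheme _hdom hpre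
  unfold Spec_get_intelligent_colors_py get_intelligent_colors_py get_intelligent_colors_py_alt
  have hL : color_scheme ≠ some [] →
      0 < (color_scheme.getD ["rgba(93, 164, 214, 0.7)", "rgba(255, 144, 14, 0.7)"]).length := by
    rcases color_scheme with _ | (_ | ⟨a, t⟩) <;> simp
  by_cases hle : num_needed ≤ ((color_scheme.getD ["rgba(93, 164, 214, 0.7)", "rgba(255, 144, 14, 0.7)"]).length : Int)
  · rw [if_pos hle, pvCycleLoop_exit _ _ _ _ ?_, List.nil_append]
    rcases color_scheme with _ | (_ | ⟨a, t⟩)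
    · simp at hle ⊢; omega
    · rcases hpre with hne | hk
      · exact absurd rfl hne
      · simp; omega
    · simp at hle ⊢; omega
  · push_neg at hle
    have hne : color_scheme ≠ some [] := by
      rintro rfl
      rcases hpre with h | h
      · exact h rfl
      · simp at hle; omega
    have hLpos := hL hne
    set scheme := color_scheme.getD ["rgba(93, 164, 214, 0.7)", "rgba(255, 144, 14, 0.7)"] with hs
    have hnpos : 0 < num_needed := by
      have h2 : (1 : Int) ≤ (scheme.length : Int) := by exact_mod_cast hLpos
      omega
    rw [if_neg (by omega), a_loop_eq num_needed scheme hLpos hle,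
      pvCycleLoop_eq scheme hLpos num_needed.toNat [] num_needed hnpos
        (by have h1 : (num_needed.toNat : Int) = num_needed := Int.toNat_of_nonneg (by omega)
            have h2 : (1 : Int) ≤ (scheme.length : Int) := by exact_mod_cast hLpos
            nlinarith [h1]),
      List.nil_append]
    apply take_flatten_replicate_congr scheme hLpos
    · have hb := rep_bound num_needed.toNat scheme.length hLpos
      rw [Int.toNat_of_nonneg (by omega : (0:Int) ≤ num_needed)] at hb
      omega
    · have h1 : num_needed.toNat ≤ (num_needed.toNat + 1) * 1 := by omega
      calc num_needed.toNat ≤ (num_needed.toNat + 1) * 1 := h1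
        _ ≤ (num_needed.toNat + 1) * scheme.length := Nat.mul_le_mul_left _ hLpos
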